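-- pv_equiv track=rewrite | github.com/soloimsad/Arqui-T1 | convierte.py | buscar_punto
-- ===== SOURCE A (Python) =====
-- def buscar_punto(num):
--     """
--     buscar_punto(num)
--     -------------------------
--     num: numero binario
--     -------------------------
--     Funcion que recibe un numero binario y retorna la posicion del punto que separa la parte entera y decimal de este.
--     En caso de no encontrar punto (que corresponderia a que el numero solo tiene parte entera) retorna 0.
--     """
--     cont = 0
--     pos_punto = 0
--     for char in num:
--         if char == ".":
--             pos_punto = cont
--         cont += 1
--
--     return pos_punto
-- ===== SOURCE B (Python) =====
-- def buscar_punto(num):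
--     """Reverse scan: return at the first dot seen from the back; 0 if none."""
--     for i in range(len(num) - 1, -1, -1):
--         if num[i] == ".":
--             return i
--     return 0
-- ===== Notes on version B (the rewrite author's own statement) =====
-- stated objective: alternative
-- what changed: Replaces A's forward exhaustive pass that overwrites a running position counter with a reverse scan that returns immediately at the first dot seen from the end (the last dot), short-circuiting instead of always traversing the whole string.
import Mathlib
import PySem

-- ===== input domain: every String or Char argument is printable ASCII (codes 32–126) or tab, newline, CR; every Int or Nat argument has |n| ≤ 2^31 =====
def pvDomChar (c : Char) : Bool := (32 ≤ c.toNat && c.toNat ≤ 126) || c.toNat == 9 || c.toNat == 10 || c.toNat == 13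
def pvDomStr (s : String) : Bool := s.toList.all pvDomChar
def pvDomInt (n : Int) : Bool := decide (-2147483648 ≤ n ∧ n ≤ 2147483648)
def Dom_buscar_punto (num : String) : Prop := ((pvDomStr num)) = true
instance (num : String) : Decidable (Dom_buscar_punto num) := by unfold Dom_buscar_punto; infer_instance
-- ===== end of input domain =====

-- B replaces A's forward pass (running counter, overwrite-on-dot) with a reverse scan
-- that returns at the first dot seen from the back; alternative decomposition, same O(n).


-- ===== PORT A =====
-- state (cont, pos_punto); for each char: if '.', pos_punto := cont; cont += 1
def buscar_punto (num : String) : Int :=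
  (num.toList.foldl (fun (s : Int × Int) c =>
      (s.1 + 1, if c = '.' then s.1 else s.2)) (0, 0)).2

-- ===== PORT B =====
-- reverse scan: walk the reversed character list; at the first '.' return its
-- original index (= length of the remaining suffix in the reversed list); else 0
def buscar_punto_revscan : List Char → Int
  | [] => 0
  | c :: rest => if c = '.' then (rest.length : Int) else buscar_punto_revscan rest

def buscar_punto_alt (num : String) : Int :=
  buscar_punto_revscan num.toList.reverse

-- ===== PRECONDITION & SPEC =====
def Spec_buscar_punto (num : String) (out : Int) : Prop := out = buscar_punto_alt num
instance (num : String) (out : Int) : Decidable (Spec_buscar_punto num out) := by unfold Spec_buscar_punto; infer_instance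

-- ===== CLAIM (what is proved, stated in full; the proofs are below) =====
def Claim_equal_buscar_punto : Prop := ∀ (num : String), Dom_buscar_punto num → Spec_buscar_punto num (buscar_punto num)

-- ===== LEMMAS AND PROOFS =====
def pvFoldA : Int × Int → List Char → Int × Int :=
  fun s l => l.foldl (fun (s : Int × Int) c => (s.1 + 1, if c = '.' then s.1 else s.2)) s

theorem pvFoldA_fst (l : List Char) (c0 p0 : Int) :
    (pvFoldA (c0, p0) l).1 = c0 + l.length := by
  induction l generalizing c0 p0 with
  | nil => simp [pvFoldA]
  | cons c rest ih =>
    simp only [pvFoldA, List.foldl_cons] at *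
    rw [ih]
    simp; omega

theorem pvMain (l : List Char) :
    (pvFoldA (0, 0) l).2 = buscar_punto_revscan l.reverse := by
  induction l using List.reverseRecOn with
  | nil => simp [pvFoldA, buscar_punto_revscan]
  | append_singleton l c ih =>
    have h1 : (pvFoldA (0, 0) (l ++ [c])) =
        ((pvFoldA (0, 0) l).1 + 1,
          if c = '.' then (pvFoldA (0, 0) l).1 else (pvFoldA (0, 0) l).2) := by
      simp [pvFoldA]
    rw [List.reverse_append]
    simp only [List.reverse_singleton, List.singleton_append, buscar_punto_revscan]
    rw [h1]
    by_cases hc : c = '.'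
    · simp [hc, pvFoldA_fst]
    · simp [hc, ih]

-- ===== VERDICT (by name: the statement is the Claim_ definition above) =====
theorem buscar_punto_spec : Claim_equal_buscar_punto := by
  intro num _
  unfold Spec_buscar_punto buscar_punto buscar_punto_alt
  exact pvMain num.toList
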